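-- pv_equiv track=rewrite | github.com/iabraham23/ICCWS-2026-Research | Data Scripts/input_triples.py | generate_full_text_query
-- ===== SOURCE A (Python) =====
-- def generate_full_text_query(input: str) -> str:
--     """Generate a fuzzy-matching query for full-text search."""
--     def remove_lucene_chars(text):
--         return ''.join(c for c in text if c not in r'+-=&|><!(){}[]^"~*?:\\/')
--     words = [el for el in remove_lucene_chars(input).split() if el]
--     if not words:
--         return input
--     fuzzy = ' AND '.join([f'{word}~2' for word in words])
--     return fuzzy
-- ===== SOURCE B (Python) =====
-- LUCENE_SPECIAL = set('+-=&|><!(){}[]^"~*?:\\/')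
--
-- def generate_full_text_query(input: str) -> str:
--     """Single-pass tokenizer: strip Lucene special chars and split on whitespace in one scan."""
--     words = []
--     buf = ''
--     for c in input:
--         if c.isspace():
--             if buf:
--                 words.append(buf)
--             buf = ''
--         elif c in LUCENE_SPECIAL:
--             continue
--         else:
--             buf += c
--     if buf:
--         words.append(buf)
--     if not words:
--         return input
--     return ' AND '.join(f'{word}~2' for word in words)
-- ===== Notes on version B (the rewrite author's own statement) =====
-- stated objective: alternative
-- what changed: Replaced A's three passes (filter out special chars, str.split, list-comprehension filter) by a single-pass character tokenizer with an explicit buffer that skips special chars and flushes on whitespace.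
import Mathlib
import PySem

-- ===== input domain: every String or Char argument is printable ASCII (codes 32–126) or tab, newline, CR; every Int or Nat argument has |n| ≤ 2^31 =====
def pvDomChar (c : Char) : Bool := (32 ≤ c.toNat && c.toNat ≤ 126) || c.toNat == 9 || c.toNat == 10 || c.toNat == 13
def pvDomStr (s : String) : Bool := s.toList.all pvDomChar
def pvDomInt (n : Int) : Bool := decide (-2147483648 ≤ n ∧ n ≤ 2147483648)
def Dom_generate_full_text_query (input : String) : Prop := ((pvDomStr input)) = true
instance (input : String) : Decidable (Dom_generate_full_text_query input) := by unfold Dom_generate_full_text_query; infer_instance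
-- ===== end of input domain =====

-- B rewrites A's three passes (strip special chars, split, filter) as one single-pass buffered tokenizer; same output.

-- the characters of r'+-=&|><!(){}[]^"~*?:\\/' (the raw string holds the backslash twice)
def luceneSpecial : List Char :=
  ['+','-','=','&','|','>','<','!','(',')','{','}','[',']','^','"','~','*','?',':','\\','\\','/']

-- ===== PORT A =====
def generate_full_text_query (input : String) : String :=
  -- remove_lucene_chars: join of the chars not in the special string (single-char 'in' = membership)
  let filtered : List Char := input.toList.filter (fun c => !(luceneSpecial.contains c))
  -- [el for el in ….split() if el]
  let words : List (List Char) := (PySem.Chars.split₀ filtered).filter (fun el => !el.isEmpty)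
  if words.isEmpty then input
  else String.ofList (PySem.Chars.join " AND ".toList (words.map (fun w => w ++ "~2".toList)))

-- ===== PORT B =====
-- single-pass tokenizer: buffer buf, accumulated words acc (in reverse)
def pvTokenize : List Char → List Char → List (List Char) → List (List Char)
  | [], buf, acc => (if buf.isEmpty then acc else buf :: acc).reverse
  | c :: rest, buf, acc =>
    if PySem.Chars.isspace c then
      pvTokenize rest [] (if buf.isEmpty then acc else buf :: acc)
    else if luceneSpecial.contains c then
      pvTokenize rest buf acc
    else
      pvTokenize rest (buf ++ [c]) acc

def generate_full_text_query_alt (input : String) : String :=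
  let words : List (List Char) := pvTokenize input.toList [] []
  if words.isEmpty then input
  else String.ofList (PySem.Chars.join " AND ".toList (words.map (fun w => w ++ "~2".toList)))

-- ===== PRECONDITION & SPEC =====
def Spec_generate_full_text_query (input : String) (out : String) : Prop := out = generate_full_text_query_alt input
instance (input : String) (out : String) : Decidable (Spec_generate_full_text_query input out) := by unfold Spec_generate_full_text_query; infer_instance

-- ===== CLAIM (what is proved, stated in full; the proofs are below) =====
def Claim_equal_generate_full_text_query : Prop := ∀ (input : String), Dom_generate_full_text_query input → Spec_generate_full_text_query input (generate_full_text_query input)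

-- ===== LEMMAS AND PROOFS =====

-- no Lucene special character is whitespace
theorem special_not_isspace (c : Char) (h : c ∈ luceneSpecial) :
    PySem.Chars.isspace c = false := by
  simp [luceneSpecial] at h
  rcases h with h|h|h|h|h|h|h|h|h|h|h|h|h|h|h|h|h|h|h|h|h|h <;> subst h <;> decide

-- the tokenizer is split₀'s worker run on the filtered characters
theorem tokenize_eq_go (cs : List Char) : ∀ (buf : List Char) (acc : List (List Char)),
    pvTokenize cs buf acc
      = PySem.Chars.split₀.go (cs.filter (fun c => !(luceneSpecial.contains c))) buf.reverse acc := by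
  induction cs with
  | nil =>
      intro buf acc
      simp [pvTokenize, PySem.Chars.split₀.go]
      split_ifs <;> simp
  | cons c rest ih =>
      intro buf acc
      by_cases hs : PySem.Chars.isspace c = true
      · have hns : c ∉ luceneSpecial := fun h => by
          simp [special_not_isspace c h] at hs
        rcases eq_or_ne buf [] with hb | hb
        · subst hb
          simp [pvTokenize, hs, hns, PySem.Chars.split₀.go, ih]
        · simp [pvTokenize, hs, hns, PySem.Chars.split₀.go, ih, hb]
      · by_cases hl : c ∈ luceneSpecial
        · simp [pvTokenize, hs, hl, ih]
        · simp [pvTokenize, hs, hl, PySem.Chars.split₀.go, ih]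

-- split₀ never yields an empty word
theorem go_words_nonempty (cs : List Char) : ∀ (cur : List Char) (acc : List (List Char)),
    (∀ w ∈ acc, w.isEmpty = false) →
    ∀ w ∈ PySem.Chars.split₀.go cs cur acc, w.isEmpty = false := by
  induction cs with
  | nil =>
      intro cur acc hacc w hw
      by_cases hc : cur.isEmpty
      · simp [PySem.Chars.split₀.go, hc] at hw
        exact hacc w hw
      · simp [PySem.Chars.split₀.go, hc] at hw
        rcases hw with h | h <;>
          first
            | exact hacc w h
            | (subst h; simpa using hc)
  | cons c rest ih =>
      intro cur acc hacc w hw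
      by_cases hs : PySem.Chars.isspace c = true
      · by_cases hc : cur.isEmpty
        · rw [PySem.Chars.split₀.go] at hw
          simp only [hs, hc, if_true] at hw
          exact ih [] acc hacc w hw
        · rw [PySem.Chars.split₀.go] at hw
          simp only [hs, hc, if_true, Bool.false_eq_true, if_false] at hw
          refine ih [] (cur.reverse :: acc) ?_ w hw
          intro v hv
          rcases List.mem_cons.1 hv with h | h
          · subst h; simpa using hc
          · exact hacc v h
      · rw [PySem.Chars.split₀.go] at hw
        simp only [hs] at hw
        exact ih (c :: cur) acc hacc w hw

theorem go_filter_nonempty (cs : List Char) :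
    (PySem.Chars.split₀.go cs [] []).filter (fun el => !el.isEmpty)
      = PySem.Chars.split₀.go cs [] [] := by
  apply List.filter_eq_self.2
  intro w hw
  have := go_words_nonempty cs [] [] (by simp) w hw
  simp [this]

-- ===== VERDICT (by name: the statement is the Claim_ definition above) =====
theorem generate_full_text_query_spec : Claim_equal_generate_full_text_query := by
  intro input _
  unfold Spec_generate_full_text_query generate_full_text_query generate_full_text_query_alt
  simp only [tokenize_eq_go, List.reverse_nil, PySem.Chars.split₀, go_filter_nonempty]
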